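-- pv_equiv track=rewrite | github.com/AryelSouza/Projeto_xadrez_python | peças.py | verificarSeHaPecasEntreTorreRei
-- ===== SOURCE A (Python) =====
-- LINHA = 2
--
-- COLUNA = 3
--
-- def pegaPeca(pecas, linha, coluna):
--     """
--     função para encontrar as peças
--     :param pecas:lista todas as peças
--     :param linha: linha selecionada
--     :param coluna: coluna selecionada
--     :return: None caso não tenha  nenhuma peça,peca caso tenha uma peça
--     """
--     for peca in pecas:
--         if peca[LINHA] == linha and peca[COLUNA] == coluna:
--             return peca
--
--     return None
--
-- def verificarSeHaPecasEntreTorreRei(torre, rei, pecas_brancas, pecas_pretas):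
--     """
--     função que verifica se há casas entre a torre e o rei para a realização do roque
--     :param torre: peça da torre
--     :param rei: peça do rei
--     :param pecas_brancas: lista as peças brancas
--     :param pecas_pretas: lista as peças pretas
--     :return: True se não houver peças entre eles,False se houver peças entre eles
--     """
--     linha = torre[LINHA]
--
--     if torre[COLUNA] > rei[COLUNA]:
--         for i in range(rei[COLUNA] + 1, 7):
--             peca = pegaPeca(pecas_brancas, linha, i)
--             if peca != None:
--                 return True
--
--             peca = pegaPeca(pecas_pretas, linha, i)
--             if peca != None:
--                 return True
--     else:
--         for i in range(1, rei[COLUNA]):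
--             peca = pegaPeca(pecas_brancas, linha, i)
--             if peca != None:
--                 return True
--
--             peca = pegaPeca(pecas_pretas, linha, i)
--             if peca != None:
--                 return True
--
--     return False
-- ===== SOURCE B (Python) =====
-- LINHA = 2
--
-- COLUNA = 3
--
-- def verificarSeHaPecasEntreTorreRei(torre, rei, pecas_brancas, pecas_pretas):
--     """Single pass over all pieces against the blocked-column interval (simpler than A's per-column searches)."""
--     linha = torre[LINHA]
--     if torre[COLUNA] > rei[COLUNA]:
--         lo, hi = rei[COLUNA] + 1, 7
--     else:
--         lo, hi = 1, rei[COLUNA]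
--     for peca in pecas_brancas + pecas_pretas:
--         if peca[LINHA] == linha and lo <= peca[COLUNA] < hi:
--             return True
--     return False
-- ===== Notes on version B (the rewrite author's own statement) =====
-- stated objective: simpler
-- what changed: Replaces A's per-column loop with its inner pegaPeca scans by computing the blocked-column interval once and making a single pass over pecas_brancas + pecas_pretas, returning True at the first piece on the rook's row with a column inside the interval.
-- outside the precondition, e.g. on verificarSeHaPecasEntreTorreRei([0, 0, 0, 0], [0, 0, 0, 0], [[0]], []): A returns False, B raises IndexError; on verificarSeHaPecasEntreTorreRei([0, 0, 0, 7], [0, 0, 0, 0], [[0, 0, 0, 1]], [[9]]): A returns True, B returns True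
import Mathlib
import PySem

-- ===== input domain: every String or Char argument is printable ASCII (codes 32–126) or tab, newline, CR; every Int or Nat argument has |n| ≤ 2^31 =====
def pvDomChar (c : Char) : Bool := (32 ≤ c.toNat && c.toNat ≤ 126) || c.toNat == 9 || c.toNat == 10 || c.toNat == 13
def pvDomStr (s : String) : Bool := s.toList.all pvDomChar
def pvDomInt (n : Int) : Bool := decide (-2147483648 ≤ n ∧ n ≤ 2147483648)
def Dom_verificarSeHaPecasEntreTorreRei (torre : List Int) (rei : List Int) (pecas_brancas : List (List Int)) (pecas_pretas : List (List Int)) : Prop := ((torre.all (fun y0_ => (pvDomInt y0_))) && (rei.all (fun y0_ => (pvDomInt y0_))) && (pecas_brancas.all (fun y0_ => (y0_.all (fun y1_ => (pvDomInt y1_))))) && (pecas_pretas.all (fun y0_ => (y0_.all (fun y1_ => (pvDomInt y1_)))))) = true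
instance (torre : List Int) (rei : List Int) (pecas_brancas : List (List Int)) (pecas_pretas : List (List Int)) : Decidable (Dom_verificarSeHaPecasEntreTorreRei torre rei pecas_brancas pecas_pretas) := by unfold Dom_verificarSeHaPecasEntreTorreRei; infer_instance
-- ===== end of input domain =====

-- B replaces A's per-column inner searches (pegaPeca per column of the interval) by one pass over
-- all pieces against the blocked-column interval computed once (objective: simpler).

-- ===== PORT A =====
-- pegaPeca: scan the pieces, return the first with matching row and column (None otherwise).
-- Outside Pre_ a Python index would raise; the port reads out-of-range indices as 0 via getD
-- (exact on Pre_, where every accessed index is in range).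
def pegaPecaPort (pecas : List (List Int)) (linha coluna : Int) : Option (List Int) :=
  match pecas with
  | [] => none
  | p :: rest =>
    if ((PySem.List.pyGet? p 2).getD 0 == linha && (PySem.List.pyGet? p 3).getD 0 == coluna) then
      some p
    else pegaPecaPort rest linha coluna

-- A's for-loop over the columns, returning True on the first column holding a piece.
def loopColsA (pecas_brancas pecas_pretas : List (List Int)) (linha : Int) : List Int → Bool
  | [] => false
  | i :: rest =>
    if pegaPecaPort pecas_brancas linha i ≠ none then true
    else if pegaPecaPort pecas_pretas linha i ≠ none then true
    else loopColsA pecas_brancas pecas_pretas linha rest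

def verificarSeHaPecasEntreTorreRei (torre : List Int) (rei : List Int) (pecas_brancas : List (List Int)) (pecas_pretas : List (List Int)) : Bool :=
  let linha := (PySem.List.pyGet? torre 2).getD 0
  if (PySem.List.pyGet? torre 3).getD 0 > (PySem.List.pyGet? rei 3).getD 0 then
    loopColsA pecas_brancas pecas_pretas linha (PySem.List.pyRange ((PySem.List.pyGet? rei 3).getD 0 + 1) 7 1)
  else
    loopColsA pecas_brancas pecas_pretas linha (PySem.List.pyRange 1 ((PySem.List.pyGet? rei 3).getD 0) 1)

-- ===== PORT B =====
-- B's single for-loop over pecas_brancas + pecas_pretas.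
def loopPecasB (linha lo hi : Int) : List (List Int) → Bool
  | [] => false
  | p :: rest =>
    if ((PySem.List.pyGet? p 2).getD 0 == linha
        && (lo ≤ (PySem.List.pyGet? p 3).getD 0 && (PySem.List.pyGet? p 3).getD 0 < hi)) then true
    else loopPecasB linha lo hi rest

def verificarSeHaPecasEntreTorreRei_alt (torre : List Int) (rei : List Int) (pecas_brancas : List (List Int)) (pecas_pretas : List (List Int)) : Bool :=
  let linha := (PySem.List.pyGet? torre 2).getD 0
  let lohi : Int × Int :=
    if (PySem.List.pyGet? torre 3).getD 0 > (PySem.List.pyGet? rei 3).getD 0 then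
      ((PySem.List.pyGet? rei 3).getD 0 + 1, 7)
    else (1, (PySem.List.pyGet? rei 3).getD 0)
  loopPecasB linha lohi.1 lohi.2 (pecas_brancas ++ pecas_pretas)

-- ===== PRECONDITION & SPEC =====
-- Pre_ excludes inputs where an index raises IndexError: short torre/rei (A raises), and pieces
-- shorter than the fields the scans read (length < 3, or length = 3 with matching row): on a few
-- such inputs A happens to return — the interval is empty or A finds a blocker before the short
-- piece — but B's single pass (and on the True case, neither differs): see the cites.
def Pre_verificarSeHaPecasEntreTorreRei (torre : List Int) (rei : List Int) (pecas_brancas : List (List Int)) (pecas_pretas : List (List Int)) : Prop :=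
  4 ≤ torre.length ∧ 4 ≤ rei.length ∧
  ∀ p ∈ pecas_brancas ++ pecas_pretas,
    3 ≤ p.length ∧ (p.getD 2 0 = torre.getD 2 0 → 4 ≤ p.length)
instance (torre : List Int) (rei : List Int) (pecas_brancas : List (List Int)) (pecas_pretas : List (List Int)) : Decidable (Pre_verificarSeHaPecasEntreTorreRei torre rei pecas_brancas pecas_pretas) := by unfold Pre_verificarSeHaPecasEntreTorreRei; infer_instance

def pvWitness_verificarSeHaPecasEntreTorreRei : List Int × List Int × List (List Int) × List (List Int) :=
  ([0, 0, 0, 7], [0, 0, 0, 4], [[0, 0, 0, 5]], [[0, 0, 1, 2]])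

def Spec_verificarSeHaPecasEntreTorreRei (torre : List Int) (rei : List Int) (pecas_brancas : List (List Int)) (pecas_pretas : List (List Int)) (out : Bool) : Prop := out = verificarSeHaPecasEntreTorreRei_alt torre rei pecas_brancas pecas_pretas
instance (torre : List Int) (rei : List Int) (pecas_brancas : List (List Int)) (pecas_pretas : List (List Int)) (out : Bool) : Decidable (Spec_verificarSeHaPecasEntreTorreRei torre rei pecas_brancas pecas_pretas out) := by unfold Spec_verificarSeHaPecasEntreTorreRei; infer_instance

-- ===== CLAIM (what is proved, stated in full; the proofs are below) =====
def Claim_equal_verificarSeHaPecasEntreTorreRei : Prop := ∀ (torre : List Int) (rei : List Int) (pecas_brancas : List (List Int)) (pecas_pretas : List (List Int)), Dom_verificarSeHaPecasEntreTorreRei torre rei pecas_brancas pecas_pretas → Pre_verificarSeHaPecasEntreTorreRei torre rei pecas_brancas pecas_pretas → Spec_verificarSeHaPecasEntreTorreRei torre rei pecas_brancas pecas_pretas (verificarSeHaPecasEntreTorreRei torre rei pecas_brancas pecas_pretas)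

-- ===== LEMMAS AND PROOFS =====

-- pegaPeca finds a piece iff some piece has the row and column.
theorem pegaPecaPort_isSome (pecas : List (List Int)) (linha coluna : Int) :
    (pegaPecaPort pecas linha coluna ≠ none) ↔
      ∃ p ∈ pecas, (PySem.List.pyGet? p 2).getD 0 = linha ∧ (PySem.List.pyGet? p 3).getD 0 = coluna := by
  induction pecas with
  | nil => simp [pegaPecaPort]
  | cons p rest ih =>
    simp only [pegaPecaPort]
    split_ifs with h
    · simp_all
    · simp only [List.mem_cons, ne_eq]
      rw [ne_eq] at ih
      rw [ih]
      constructor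
      · rintro ⟨q, hq, h2, h3⟩; exact ⟨q, Or.inr hq, h2, h3⟩
      · rintro ⟨q, hq | hq, h2, h3⟩
        · subst hq; simp_all
        · exact ⟨q, hq, h2, h3⟩

-- A's column loop returns true iff some column of the list holds a piece of that row.
theorem loopColsA_true (pb pp : List (List Int)) (linha : Int) (cols : List Int) :
    loopColsA pb pp linha cols = true ↔
      ∃ i ∈ cols, ∃ p ∈ pb ++ pp,
        (PySem.List.pyGet? p 2).getD 0 = linha ∧ (PySem.List.pyGet? p 3).getD 0 = i := by
  induction cols with
  | nil => simp [loopColsA]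
  | cons i rest ih =>
    simp only [loopColsA]
    split_ifs with h1 h2
    · rw [pegaPecaPort_isSome] at h1
      obtain ⟨p, hp, h2, h3⟩ := h1
      simp only [true_iff]
      exact ⟨i, by simp, p, List.mem_append_left _ hp, h2, h3⟩
    · rw [pegaPecaPort_isSome] at h2
      obtain ⟨p, hp, hh2, h3⟩ := h2
      simp only [true_iff]
      exact ⟨i, by simp, p, List.mem_append_right _ hp, hh2, h3⟩
    · rw [ih]
      rw [pegaPecaPort_isSome] at h1 h2
      push Not at h1 h2
      constructor
      · rintro ⟨j, hj, p, hp, ha, hb⟩; exact ⟨j, List.mem_cons_of_mem _ hj, p, hp, ha, hb⟩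
      · rintro ⟨j, hj, p, hp, ha, hb⟩
        rcases List.mem_cons.mp hj with rfl | hj
        · rcases List.mem_append.mp hp with hq | hq
          · exact absurd hb (h1 p hq ha)
          · exact absurd hb (h2 p hq ha)
        · exact ⟨j, hj, p, hp, ha, hb⟩

-- B's piece loop returns true iff some piece has the row and a column in [lo, hi).
theorem loopPecasB_true (linha lo hi : Int) (pecas : List (List Int)) :
    loopPecasB linha lo hi pecas = true ↔
      ∃ p ∈ pecas, (PySem.List.pyGet? p 2).getD 0 = linha ∧
        lo ≤ (PySem.List.pyGet? p 3).getD 0 ∧ (PySem.List.pyGet? p 3).getD 0 < hi := by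
  induction pecas with
  | nil => simp [loopPecasB]
  | cons p rest ih =>
    simp only [loopPecasB]
    split_ifs with h
    · simp only [Bool.and_eq_true, beq_iff_eq, decide_eq_true_eq] at h
      simp only [true_iff]
      exact ⟨p, by simp, h.1, h.2.1, h.2.2⟩
    · rw [ih]
      simp only [Bool.and_eq_true, beq_iff_eq, decide_eq_true_eq, not_and, not_lt] at h
      constructor
      · rintro ⟨q, hq, ha, hb, hc⟩; exact ⟨q, List.mem_cons_of_mem _ hq, ha, hb, hc⟩
      · rintro ⟨q, hq, ha, hb, hc⟩
        rcases List.mem_cons.mp hq with rfl | hq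
        · exact absurd hc (not_lt.mpr (h ha hb))
        · exact ⟨q, hq, ha, hb, hc⟩

-- The two loops agree for any interval [lo, hi): a blocked column exists iff a blocking piece does.
theorem loops_agree (pb pp : List (List Int)) (linha lo hi : Int) :
    loopColsA pb pp linha (PySem.List.pyRange lo hi 1) = loopPecasB linha lo hi (pb ++ pp) := by
  rw [Bool.eq_iff_iff, loopColsA_true, loopPecasB_true]
  constructor
  · rintro ⟨i, hi', p, hp, ha, hb⟩
    rw [PySem.List.mem_pyRange_one] at hi'
    exact ⟨p, hp, ha, hb ▸ hi'.1, hb ▸ hi'.2⟩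
  · rintro ⟨p, hp, ha, hb, hc⟩
    exact ⟨(PySem.List.pyGet? p 3).getD 0, PySem.List.mem_pyRange_one.mpr ⟨hb, hc⟩, p, hp, ha, rfl⟩

-- ===== VERDICT (by name: the statement is the Claim_ definition above) =====
theorem verificarSeHaPecasEntreTorreRei_spec : Claim_equal_verificarSeHaPecasEntreTorreRei := by
  intro torre rei pb pp _ _
  unfold Spec_verificarSeHaPecasEntreTorreRei
  unfold verificarSeHaPecasEntreTorreRei verificarSeHaPecasEntreTorreRei_alt
  by_cases h : (PySem.List.pyGet? torre 3).getD 0 > (PySem.List.pyGet? rei 3).getD 0 <;>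
    simp [h, loops_agree]
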